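-- pv_equiv track=rewrite | github.com/victormaggie/Leetcode-Algorithm-Solution | daily/Week competition/Week 182.py | montonic
-- ===== SOURCE A (Python) =====
-- def montonic(rating):
--     res = []
--     for i in range(len(rating)):
--         temp = []
--         temp.append(rating[i])
--         for j in range(i, len(rating)):
--             if rating[j] > rating[i]:
--                 temp.append(rating[j])
--                 for k in range(j, len(rating)):
--                     temp.append(rating[k])
--                     res.append(temp[:])
--                     temp.pop()
--                     continue
--                 temp.pop()
--                 continue
--         temp.pop()
--         continue
--     return len(res)
-- ===== SOURCE B (Python) =====
-- def montonic(rating):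
--     # One pass with a prefix accumulator: each ascending pair (i, j) with
--     # rating[i] < rating[j] contributes (n - j) triples, so sum c_j * (n - j).
--     n = len(rating)
--     total = 0
--     seen = []
--     for j, x in enumerate(rating):
--         c = 0
--         for y in seen:
--             if y < x:
--                 c += 1
--         total += c * (n - j)
--         seen.append(x)
--     return total
-- ===== Notes on version B (the rewrite author's own statement) =====
-- stated objective: faster
-- what changed: Replaced A's triple nested scan (which materialises every increasing triple's list) by a single pass that, at each position j, counts earlier strictly-smaller ratings in the prefix and adds count * (n - j) to a running total.
import Mathlib
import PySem

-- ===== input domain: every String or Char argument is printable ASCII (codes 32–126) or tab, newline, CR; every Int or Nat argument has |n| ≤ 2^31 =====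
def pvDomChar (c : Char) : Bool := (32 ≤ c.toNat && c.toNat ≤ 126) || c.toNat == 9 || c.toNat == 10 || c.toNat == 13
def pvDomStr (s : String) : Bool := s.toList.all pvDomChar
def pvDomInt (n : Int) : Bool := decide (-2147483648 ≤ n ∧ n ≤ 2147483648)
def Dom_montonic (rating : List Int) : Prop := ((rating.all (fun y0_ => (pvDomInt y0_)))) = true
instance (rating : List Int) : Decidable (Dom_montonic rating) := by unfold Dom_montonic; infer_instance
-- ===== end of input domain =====

-- B replaces A's triple nested scan by a single pass with a prefix accumulator,
-- adding (number of earlier smaller ratings) * (n - j) at each position j (objective: faster).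

-- ===== PORT A =====
-- literal transliteration: res collects the sublists, temp is pushed/popped exactly as in A
def montonic (rating : List Int) : Int :=
  let n := rating.length
  let res : List (List Int) :=
    (List.range n).foldl (fun res i =>
      -- temp = []; temp.append(rating[i])
      let temp : List Int := [] ++ [rating.getD i 0]
      let st :=
        (List.range' i (n - i)).foldl (fun (st : List (List Int) × List Int) j =>
          if rating.getD i 0 < rating.getD j 0 then
            -- temp.append(rating[j])
            let t := st.2 ++ [rating.getD j 0]
            let st2 :=
              (List.range' j (n - j)).foldl (fun (st : List (List Int) × List Int) k =>
                -- temp.append(rating[k]); res.append(temp[:]); temp.pop()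
                let t := st.2 ++ [rating.getD k 0]
                (st.1 ++ [t], t.dropLast)) (st.1, t)
            -- temp.pop()
            (st2.1, st2.2.dropLast)
          else st) (res, temp)
      -- temp.pop() (temp is then discarded)
      st.1) []
  (res.length : Int)

-- ===== PORT B =====
def montonic_alt (rating : List Int) : Int :=
  let n : Int := rating.length
  let st :=
    (PySem.List.enumerate rating).foldl (fun (st : Int × List Int) jx =>
      let c := st.2.foldl (fun c y => if y < jx.2 then c + 1 else c) (0 : Int)
      (st.1 + c * (n - jx.1), st.2 ++ [jx.2])) ((0 : Int), ([] : List Int))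
  st.1

-- ===== PRECONDITION & SPEC =====
def Spec_montonic (rating : List Int) (out : Int) : Prop := out = montonic_alt rating
instance (rating : List Int) (out : Int) : Decidable (Spec_montonic rating out) := by unfold Spec_montonic; infer_instance

-- ===== CLAIM (what is proved, stated in full; the proofs are below) =====
def Claim_equal_montonic : Prop := ∀ (rating : List Int), Dom_montonic rating → Spec_montonic rating (montonic rating)

-- ===== LEMMAS AND PROOFS =====

-- named copies of the ports' loop bodies (definitionally equal to the lambdas in the ports)
def pvKStep (r : List Int) (st : List (List Int) × List Int) (k : Nat) :
    List (List Int) × List Int :=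
  let t := st.2 ++ [r.getD k 0]
  (st.1 ++ [t], t.dropLast)

def pvJStep (r : List Int) (n i : Nat) (st : List (List Int) × List Int) (j : Nat) :
    List (List Int) × List Int :=
  if r.getD i 0 < r.getD j 0 then
    let t := st.2 ++ [r.getD j 0]
    let st2 := (List.range' j (n - j)).foldl (pvKStep r) (st.1, t)
    (st2.1, st2.2.dropLast)
  else st

def pvIStep (r : List Int) (n : Nat) (res : List (List Int)) (i : Nat) : List (List Int) :=
  let temp : List Int := [] ++ [r.getD i 0]
  let st := (List.range' i (n - i)).foldl (pvJStep r n i) (res, temp)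
  st.1

def pvBStep (n : Int) (st : Int × List Int) (jx : Int × Int) : Int × List Int :=
  let c := st.2.foldl (fun c y => if y < jx.2 then c + 1 else c) (0 : Int)
  (st.1 + c * (n - jx.1), st.2 ++ [jx.2])

theorem pv_A_fold (r : List Int) :
    montonic r = (((List.range r.length).foldl (pvIStep r r.length) []).length : Int) := rfl

theorem pv_B_fold (r : List Int) :
    montonic_alt r
      = ((PySem.List.enumerate r).foldl (pvBStep (r.length : Int)) ((0 : Int), ([] : List Int))).1 := rfl

-- number of earlier positions with a strictly smaller value
def pvCnt (r : List Int) (j : Nat) : Nat :=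
  (List.range j).countP (fun i => decide (r.getD i 0 < r.getD j 0))

-- the common closed form both ports are reduced to
def pvTot (r : List Int) : Nat :=
  ∑ j ∈ Finset.range r.length, pvCnt r j * (r.length - j)

theorem pv_kfold (r : List Int) (L : List Nat) (res : List (List Int)) (temp : List Int) :
    L.foldl (pvKStep r) (res, temp)
      = (res ++ L.map (fun k => temp ++ [r.getD k 0]), temp) := by
  induction L generalizing res with
  | nil => simp
  | cons k L ih =>
    rw [List.foldl_cons]
    have h : pvKStep r (res, temp) k = (res ++ [temp ++ [r.getD k 0]], temp) := by
      simp [pvKStep]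
    rw [h, ih]
    simp

theorem pv_jfold (r : List Int) (n i : Nat) (L : List Nat) (res : List (List Int))
    (temp : List Int) :
    L.foldl (pvJStep r n i) (res, temp)
      = (res ++ L.flatMap (fun j =>
          if r.getD i 0 < r.getD j 0 then
            (List.range' j (n - j)).map (fun k => temp ++ [r.getD j 0, r.getD k 0])
          else []), temp) := by
  induction L generalizing res with
  | nil => simp
  | cons j L ih =>
    rw [List.foldl_cons]
    have h : pvJStep r n i (res, temp) j
        = (res ++ (if r.getD i 0 < r.getD j 0 then
            (List.range' j (n - j)).map (fun k => temp ++ [r.getD j 0, r.getD k 0])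
          else []), temp) := by
      simp only [pvJStep, pv_kfold, List.dropLast_concat]
      split_ifs <;> simp
    rw [h, ih]
    simp

theorem pv_ifold (r : List Int) (n : Nat) (I : List Nat) (res : List (List Int)) :
    (I.foldl (pvIStep r n) res).length
      = res.length + (I.map (fun i =>
          ((List.range' i (n - i)).map (fun j =>
            if r.getD i 0 < r.getD j 0 then n - j else 0)).sum)).sum := by
  induction I generalizing res with
  | nil => simp
  | cons i I ih =>
    rw [List.foldl_cons]
    have h : pvIStep r n res i
        = res ++ (List.range' i (n - i)).flatMap (fun j =>
            if r.getD i 0 < r.getD j 0 then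
              (List.range' j (n - j)).map (fun k => ([] ++ [r.getD i 0]) ++ [r.getD j 0, r.getD k 0])
            else []) := by
      simp [pvIStep, pv_jfold]
    rw [h, ih]
    simp only [List.length_append, List.length_flatMap, List.map_cons, List.sum_cons]
    have h2 : ∀ j : Nat,
        ((fun j => if r.getD i 0 < r.getD j 0 then
            (List.range' j (n - j)).map (fun k => ([] ++ [r.getD i 0]) ++ [r.getD j 0, r.getD k 0])
          else []) j).length = (if r.getD i 0 < r.getD j 0 then n - j else 0) := by
      intro j; by_cases hc : r[i]?.getD 0 < r[j]?.getD 0 <;>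
        simp [List.getD, hc, List.length_range']
    simp only [h2]
    omega

theorem pv_sum_list_range (n : Nat) (f : Nat → Nat) :
    ((List.range n).map f).sum = ∑ i ∈ Finset.range n, f i := by
  induction n with
  | zero => simp
  | succ n ih => simp [List.range_succ, Finset.sum_range_succ, ih]

theorem pv_sum_list_range' (i m : Nat) (f : Nat → Nat) :
    ((List.range' i m).map f).sum = ∑ t ∈ Finset.range m, f (i + t) := by
  induction m generalizing i with
  | zero => simp
  | succ m ih =>
    rw [List.range'_succ, List.map_cons, List.sum_cons, ih, Finset.sum_range_succ']
    have : ∀ t, f (i + 1 + t) = f (i + (t + 1)) := by intro t; congr 1; omega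
    simp [this]
    omega

theorem pv_cnt_sum (r : List Int) (m : Nat) (x : Int) :
    ∑ i ∈ Finset.range m, (if r.getD i 0 < x then 1 else 0)
      = (List.range m).countP (fun i => decide (r.getD i 0 < x)) := by
  induction m with
  | zero => simp
  | succ m ih =>
    rw [Finset.sum_range_succ, ih, List.range_succ, List.countP_append]
    by_cases hc : r.getD m 0 < x <;> simp [List.countP_cons]

-- A equals the closed form
theorem pv_A_eq (r : List Int) : montonic r = (pvTot r : Int) := by
  rw [pv_A_fold]
  congr 1
  set n := r.length with hn
  rw [pv_ifold, pv_sum_list_range]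
  simp only [pv_sum_list_range']
  have hIco : ∀ i ∈ Finset.range n,
      (∑ t ∈ Finset.range (n - i), (if r.getD i 0 < r.getD (i + t) 0 then n - (i + t) else 0))
        = ∑ j ∈ Finset.Ico i n, (if r.getD i 0 < r.getD j 0 then n - j else 0) := by
    intro i _
    exact (Finset.sum_Ico_eq_sum_range
      (fun j => if r.getD i 0 < r.getD j 0 then n - j else 0) i n).symm
  rw [Finset.sum_congr rfl hIco]
  rw [Finset.range_eq_Ico, Finset.sum_Ico_Ico_comm 0 n]
  unfold pvTot pvCnt
  rw [← hn, Finset.range_eq_Ico]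
  simp only [List.length_nil, Nat.zero_add]
  apply Finset.sum_congr rfl
  intro j hj
  rw [Finset.mem_Ico] at hj
  have hjj : ∀ i ∈ Finset.Ico 0 (j + 1),
      (if r.getD i 0 < r.getD j 0 then n - j else 0)
        = (n - j) * (if r.getD i 0 < r.getD j 0 then 1 else 0) := by
    intro i _
    simp [mul_ite]
  rw [Finset.sum_congr rfl hjj, ← Finset.mul_sum, ← Finset.range_eq_Ico]
  rw [Finset.sum_range_succ]
  have hjz : (if r.getD j 0 < r.getD j 0 then 1 else 0) = 0 := by simp
  rw [hjz, add_zero, pv_cnt_sum, Nat.mul_comm]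

-- B's inner counting loop
theorem pv_cfold (acc : List Int) (x : Int) (c0 : Int) :
    acc.foldl (fun c y => if y < x then c + 1 else c) c0
      = c0 + (acc.countP (fun y => decide (y < x)) : Int) := by
  induction acc generalizing c0 with
  | nil => simp
  | cons a acc ih =>
    by_cases h : a < x
    · simp [h, ih]; ring
    · simp [h, ih]

-- the one-pass loop of B, characterised
theorem pv_bfold (n : Int) (l : List Int) :
    ∀ (acc : List Int) (t s : Int),
    (PySem.List.enumerate l s).foldl (pvBStep n) (t, acc)
      = (t + ∑ m ∈ Finset.range l.length,
            (((acc ++ l.take m).countP (fun y => decide (y < l.getD m 0)) : Int)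
              * (n - (s + m))),
         acc ++ l) := by
  induction l with
  | nil => intro acc t s; simp [PySem.List.enumerate_nil]
  | cons x xs ih =>
    intro acc t s
    rw [PySem.List.enumerate_cons, List.foldl_cons]
    have h : pvBStep n (t, acc) (s, x)
        = (t + (acc.countP (fun y => decide (y < x)) : Int) * (n - s), acc ++ [x]) := by
      simp only [pvBStep, pv_cfold]
      simp
    rw [h, ih, Prod.mk.injEq]
    refine ⟨?_, by simp⟩
    case _ =>
      rw [List.length_cons, Finset.sum_range_succ']
      have hterm : ∀ m,
          (((acc ++ [x]) ++ xs.take m).countP (fun y => decide (y < xs.getD m 0)) : Int)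
              * (n - (s + 1 + m))
            = ((acc ++ (x :: xs).take (m + 1)).countP
                (fun y => decide (y < (x :: xs).getD (m + 1) 0)) : Int)
              * (n - (s + (↑m + 1))) := by
        intro m
        have h1 : (acc ++ [x]) ++ xs.take m = acc ++ (x :: xs).take (m + 1) := by
          simp [List.take_succ_cons]
        have h2 : (x :: xs).getD (m + 1) 0 = xs.getD m 0 := by simp [List.getD]
        rw [h1, h2]
        have h3 : n - (s + 1 + (m : Int)) = n - (s + ((m : Int) + 1)) := by ring
        rw [h3]
      have hsum : ∑ m ∈ Finset.range xs.length,
            (((acc ++ [x]) ++ xs.take m).countP (fun y => decide (y < xs.getD m 0)) : Int)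
              * (n - (s + 1 + m))
          = ∑ m ∈ Finset.range xs.length,
            ((acc ++ (x :: xs).take (m + 1)).countP
                (fun y => decide (y < (x :: xs).getD (m + 1) 0)) : Int)
              * (n - (s + (↑m + 1))) := by
        exact Finset.sum_congr rfl (fun m _ => hterm m)
      rw [hsum]
      simp only [List.take_zero, List.append_nil, List.getD_cons_zero, Nat.cast_zero, add_zero]
      push_cast
      ring


-- counting earlier smaller values equals counting earlier smaller positions
theorem pv_posval (r : List Int) (x : Int) (j : Nat) (hj : j ≤ r.length) :
    (r.take j).countP (fun y => decide (y < x))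
      = (List.range j).countP (fun i => decide (r.getD i 0 < x)) := by
  induction j with
  | zero => simp
  | succ m ih =>
    have hm : m < r.length := by omega
    rw [List.take_add_one, List.range_succ, List.countP_append, List.countP_append,
      ih (by omega)]
    simp [List.getD, List.getElem?_eq_getElem hm]

theorem pv_B_eq (r : List Int) : montonic_alt r = (pvTot r : Int) := by
  rw [pv_B_fold, pv_bfold]
  simp only [List.nil_append, zero_add]
  unfold pvTot
  push_cast [Nat.cast_sum]
  refine Finset.sum_congr rfl ?_
  intro m hm
  rw [Finset.mem_range] at hm
  rw [pv_posval r (r.getD m 0) m (by omega)]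
  rw [show (List.range m).countP (fun i => decide (r.getD i 0 < r.getD m 0)) = pvCnt r m from rfl]
  have : ((r.length - m : Nat) : Int) = (r.length : Int) - m := by omega
  push_cast [this]
  ring

theorem montonic_spec : Claim_equal_montonic := by
  intro rating _
  unfold Spec_montonic
  rw [pv_A_eq, pv_B_eq]
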